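/- GENERATED by mk_final_copies.py from the proof of the farm's unit `vorbis_decode_initial.5` (farm:vorbis_decode_initial.5.1: Proof.lean) as the
   re-elaboration sweep compiled it — do not edit. -/
import Asan.CheckWalk
import Vorbis.Spec.Units.vorbis_decode_initial_5

open X86 X86.User Asan Vorbis Vorbis.Spec Vorbis.Spec.vorbis_decode_initial

set_option maxRecDepth 4000
set_option maxHeartbeats 4000000

/-- Segment 5 of `vorbis_decode_initial` (0x11321e–0x113260 + 0x1133d2–0x1133d8, 19 instructions, three check sites; stb_vorbis_fixed.c
3173–3177): the dead arm `i == EOP`, the exit `i >= f->mode_count` (eax = ebp = 0: `IAtEnd`), the checked store `*mode = i`, and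
`m = f->mode_config + i` in r14 (`IAtM`: `i < mode_count ≤ 64` by MD1, so `m` lies inside `*f`; `di_lea6`). The farm worker's `tail2`. -/
theorem Vorbis.Spec.Worked.vorbis_decode_initial_5_ok : Vorbis.Spec.vorbis_decode_initial_5.Statement := by
  intro Lay hLay μ hμ u₀ hcode hstore4 hload4 hload1 others frames len A stored room ysz u ret s hE hs hrbp hz
  have he := hE.entry
  have hpre := hE.pre
  v_entry he
  have hsp := hpre.1.rsp
  obtain ⟨hsh, hinv, hpls, hple, hprs, hpre_, hpm, hapart⟩ := hpre
  have hobj := hinv.objLive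
  have hwhere := hobj.where_ hsh.inv hsh.offText (by decide)
  simp only [Off.sizeof.stb_vorbis] at hwhere
  have henv := hinv.readerEnv
  have hoff := hinv.objOff
  simp only [Off.sizeof.stb_vorbis] at hoff
  have hwm := hpm.1.where_ hsh.inv hsh.offText (by decide)
  obtain ⟨hlm, hm1, hm2⟩ := hpm
  clear hapart
  obtain ⟨w_rip, w_rsp, w_rbx, w_r12, w_r13, w_r14, w_kept, w_eq, hsame, hun, hs0, hs1, hs2, hs3, hs4, hs5, hs6, hs7, hs8,
    hdf, hmx, hbits, hcbs, hcbe⟩ := hs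
  unfold iLoopRegs at w_kept
  have w_rbp := hrbp
  obtain ⟨z, w_rax⟩ : ∃ z, s.reg .rax = z := ⟨_, rfl⟩
  rw [w_rax] at hz
  obtain ⟨mc, hmcu⟩ : ∃ mc, u.mem.readLE (u.reg .rdi + 480) 4 = mc := ⟨_, rfl⟩
  have hmc : s.mem.readLE (u.reg .rdi + 480) 4 = mc := by u_frame hmcu
  have hmd1 : (BitVec.ofNat 32 mc).toInt ≤ 64 := by
    have h := hinv.fb.vorbis.mode.MD1.2
    simp only [vacc, voff] at h
    rw [← Mem.toInt_ofNat32_u32] at h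
    have e : u.mem.u32 ((u.reg .rdi).toNat + 480) = mc := by
      unfold Mem.u32
      rw [← readLE_field u.mem (u.reg .rdi) 480 4]
      exact hmcu
    rw [e] at h
    exact h
  u_walk hcode [hμ.vendor] until [Vorbis.L.vorbis_decode_initial.at_1133c3, Vorbis.L.vorbis_decode_initial.ret12] span [Vorbis.L.textLo, Vorbis.L.textHi] side (v_side)
  case check_113231 =>
    have hun' : ShadowUntouched u.mem s_113231.mem := by v_untouched
    refine hobj.accSmall hsh.inv hun' _ 4 (by decide) (by u_omega) ?_
    simp only [Vorbis.Off.sizeof.stb_vorbis]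
    u_omega
  case check_113246 =>
    have hun' : ShadowUntouched u.mem s_113246.mem := by v_untouched
    exact hlm.accSmall hsh.inv hun' _ 4 (by decide) (by u_omega) (by u_omega)
  case check_113260 =>
    have hun' : ShadowUntouched u.mem s_113260.mem := by v_untouched
    have hi : (Word.part .w32 z).toNat = z.toNat := by
      rw [Asan.part32_toNat]
      omega
    have hsx : (Word.ofBV (BitVec.signExtend 64 (Word.part .w32 z))).toNat = z.toNat := by
      have h := toNat_sext32 (Word.part .w32 z) (by rw [hi]; exact hz)
      rw [hi] at h
      exact h
    have hlt : z.toNat < 64 := by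
      have h1 : (Word.part .w32 z).toInt = (z.toNat : Int) := by
        have h := toInt_of_lt (Word.part .w32 z) (by rw [hi]; exact hz)
        rw [hi] at h
        exact h
      omega
    have h6 := di_lea6 _ _ hsx hlt
    generalize (Word.ofBV (BitVec.signExtend 64 (Word.part .w32 z)) +
      Word.ofBV (BitVec.signExtend 64 (Word.part .w32 z)) * 2) * 2 = y at h6 ⊢
    have ea : (u.reg .rdi + y + 484).toNat = (u.reg .rdi).toNat + 6 * z.toNat + 484 := by
      have e484 : (484 : Word).toNat = 484 := rfl
      rw [UInt64.toNat_add, UInt64.toNat_add, h6, e484]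
      omega
    refine hobj.accSmall hsh.inv hun' _ 1 (by decide) ?_ ?_
    · rw [ea]
      omega
    · rw [ea]
      simp only [Vorbis.Off.sizeof.stb_vorbis]
      omega
  · -- 0x113224 `je` taken (`i == EOP`): dead, `i` has fewer than 32 bits
    exfalso
    rw [Asan.part32_toNat] at hbr_113224
    simp only [Width.bits] at hbr_113224
    omega
  · -- 0x11323d `jle` taken (`i >= f->mode_count`): eax = ebp = 0, the epilogue
    refine ReachVia.done (Or.inl ?_)
    have hkeep := Reader.store_off_obj hbits (u.reg .rsp - 96) 8 1126966 (by u_omega) (by u_omega)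
    rw [← w_mem] at hkeep
    refine ⟨w_rip, w_rsp, w_kept.mono_all (by rfl), w_eq, ?_, by v_untouched, by u_resolve, by u_resolve, by u_resolve,
      by u_resolve, by u_resolve, by u_resolve, by u_resolve, ?_, ?_, hkeep.1.bits, ?_, ?_, ?_, ?_⟩
    · rw [w_mem]
      exact Mem.SameExcept.step_writeLE' (u.reg .rsp - 96) 8 1126966 (di_widen hsame) (by u_omega) (by u_same_side)
    · rw [w_flags]
      simp only [X86.User.df_setStatus]
      exact w_df_113231
    · rw [w_mxcsr]
      exact hmx
    · rw [w_mem]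
      u_read
      try exact hcbs
    · rw [w_mem]
      u_read
      try exact hcbe
    · left
      rw [w_rax]
      decide
    · intro h
      rw [w_rax] at h
      exact absurd h (by decide)
  · -- 0x113265: `*mode = i` is stored, r14 = m
    have hi : (Word.part .w32 z).toNat = z.toNat := by
      rw [Asan.part32_toNat]
      omega
    have hsx : (Word.ofBV (BitVec.signExtend 64 (Word.part .w32 z))).toNat = z.toNat := by
      have h := toNat_sext32 (Word.part .w32 z) (by rw [hi]; exact hz)
      rw [hi] at h
      exact h
    have hint : (Word.part .w32 z).toInt = (z.toNat : Int) := by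
      have h := toInt_of_lt (Word.part .w32 z) (by rw [hi]; exact hz)
      rw [hi] at h
      exact h
    have hlt : z.toNat < 64 := by omega
    have hmcI : stb_vorbis.mode_count u.mem (u.reg .rdi).toNat = (BitVec.ofNat 32 mc).toInt := by
      simp only [vacc, voff]
      rw [← Mem.toInt_ofNat32_u32]
      have e : u.mem.u32 ((u.reg .rdi).toNat + 480) = mc := by
        unfold Mem.u32
        rw [← readLE_field u.mem (u.reg .rdi) 480 4]
        exact hmcu
      rw [e]
    have h6 := di_lea6 _ _ hsx hlt
    refine ReachVia.done (Or.inr ⟨z.toNat, ?_⟩)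
    have hunq : ShadowUntouched u.mem s_113260r.mem := by v_untouched
    have hS : Mem.SameExcept [⟨(u.reg .rsp).toNat - 448, (u.reg .rsp).toNat⟩,
        ⟨(u.reg .r9).toNat, (u.reg .r9).toNat + 4⟩] s.mem s_113260r.mem := by
      rw [w_mem]
      u_same
    have hk := di_keep hbits hS (by
      intro w hw
      simp only [List.mem_cons, List.not_mem_nil, or_false] at hw
      rcases hw with rfl | rfl <;> simp only [] <;> omega)
    have h0 : Mem.SameExcept [⟨(u.reg .rsp).toNat - 448, (u.reg .rsp).toNat⟩,
        ⟨(u.reg .rdi).toNat + 48, (u.reg .rdi).toNat + 56⟩, ⟨(u.reg .rdi).toNat + 84, (u.reg .rdi).toNat + 96⟩,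
        ⟨(u.reg .rdi).toNat + 136, (u.reg .rdi).toNat + 144⟩, ⟨(u.reg .rdi).toNat + 1484, (u.reg .rdi).toNat + 1749⟩,
        ⟨(u.reg .rdi).toNat + 1752, (u.reg .rdi).toNat + 1784⟩, ⟨(u.reg .rdi).toNat + 1796, (u.reg .rdi).toNat + 1804⟩,
        ⟨(u.reg .rsi).toNat, (u.reg .rsi).toNat + 4⟩, ⟨(u.reg .rdx).toNat, (u.reg .rdx).toNat + 4⟩,
        ⟨(u.reg .rcx).toNat, (u.reg .rcx).toNat + 4⟩, ⟨(u.reg .r8).toNat, (u.reg .r8).toNat + 4⟩,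
        ⟨(u.reg .r9).toNat, (u.reg .r9).toNat + 4⟩] u.mem s.mem := di_widen hsame
    have h3 := Reader.sameExcept_through_callee h0 hS (by
      intro w hw
      simp only [List.mem_cons, List.not_mem_nil, or_false] at hw
      rcases hw with rfl | rfl
      · exact ⟨_, List.mem_cons_self, by simp only []; omega, by simp only []; omega⟩
      · exact ⟨⟨(u.reg .r9).toNat, (u.reg .r9).toNat + 4⟩, by simp only [List.mem_cons, true_or, or_true],
          by simp only []; omega, by simp only []; omega⟩)
    refine ⟨w_rip, w_rsp, w_rbx, w_r12, w_r13, ?_, ?_, w_rbp, ⟨hlt, by omega⟩, ?_, w_kept.mono_all (by rfl), w_eq, ?_,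
      hunq, by u_resolve, by u_resolve, by u_resolve, by u_resolve, by u_resolve, by u_resolve, by u_resolve,
      by u_resolve, by u_resolve, w_df_113260, ?_, hk.1, ?_, ?_⟩
    · rw [w_r14]
      apply UInt64.toNat_inj.mp
      have e484 : (484 : Word).toNat = 484 := rfl
      rw [UInt64.toNat_add, UInt64.toNat_add, h6, e484]
      show _ = (UInt64.ofNat _).toNat
      rw [UInt64.toNat_ofNat']
      omega
    · rw [w_r15]
      apply UInt64.toNat_inj.mp
      rw [hsx, UInt64.toNat_ofNat']
      omega
    · rw [w_mem]
      u_read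
      try exact hi
    · exact h3
    · rw [w_mxcsr]
      exact hmx
    · rw [hS.readLE (u.reg .rdi + 1800) 4 (by u_omega) ?_]
      · exact hcbs
      · intro w hw
        simp only [List.mem_cons, List.not_mem_nil, or_false] at hw
        rcases hw with rfl | rfl
        · simp only []
          u_omega
        · simp only []
          u_omega
    · rw [hS.readLE (u.reg .rdi + 1796) 4 (by u_omega) ?_]
      · exact hcbe
      · intro w hw
        simp only [List.mem_cons, List.not_mem_nil, or_false] at hw
        rcases hw with rfl | rfl
        · simp only []
          u_omega
        · simp only []
          u_omega
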